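-- pv_equiv track=rewrite | github.com/vavasik800/Logunova | main.py | solution
-- ===== SOURCE A (Python) =====
-- def solution(list_urls):
--     new_url_list = []
--     for url in list_urls:
--         try:
--             index_plus = url.index('+')
--         except:
--             index_plus = -1
--         try:
--             index_dog = url.index('@')
--         except:
--             index_dog = -1
--         if index_plus == -1:
--             if new_url_list.count(url) == 1:
--                 continue
--             new_url_list.append(url)
--             continue
--         if index_plus > index_dog:
--             if new_url_list.count(url) == 1:
--                 continue
--             new_url_list.append(url)
--             continue
--
--         new_url = url[0:index_plus] + url[index_dog:]
--         if new_url_list.count(new_url) == 1: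
--             continue
--         new_url_list.append(new_url)
--     new_urls_set = set(new_url_list)
--     return len(new_url_list)
-- ===== SOURCE B (Python) =====
-- def solution(list_urls):
--     # transform each url (strip '+...@' part), sort, count distinct via adjacent comparison
--     def transform(url):
--         p = url.find('+')
--         a = url.find('@')
--         if p == -1 or p > a:
--             return url
--         return url[:p] + url[a:]
--
--     ts = sorted(transform(u) for u in list_urls)
--     count = 0
--     prev = None
--     for t in ts:
--         if t != prev:
--             count += 1
--             prev = t
--     return count
-- ===== Notes on version B (the rewrite author's own statement) =====
-- stated objective: alternative
-- what changed: A dedups incrementally by scanning the accumulator with list.count for every url; B maps a pure transform over all urls, sorts the transformed list, and counts distinct values in one sweep comparing each element to its predecessor.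
import Mathlib
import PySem

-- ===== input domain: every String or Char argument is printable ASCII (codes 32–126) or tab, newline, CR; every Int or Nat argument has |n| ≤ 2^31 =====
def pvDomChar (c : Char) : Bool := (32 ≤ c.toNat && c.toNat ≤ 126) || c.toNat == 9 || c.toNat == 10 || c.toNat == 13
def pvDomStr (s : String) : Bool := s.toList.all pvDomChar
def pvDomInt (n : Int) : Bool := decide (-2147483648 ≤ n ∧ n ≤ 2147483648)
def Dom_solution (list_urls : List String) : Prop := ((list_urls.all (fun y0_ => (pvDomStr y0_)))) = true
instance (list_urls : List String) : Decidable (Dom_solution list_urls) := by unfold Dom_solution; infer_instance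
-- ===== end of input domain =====

-- B replaces A's list-with-repeated-count dedup by transform-all, sort, count adjacent distinct (alternative algorithm).


-- ===== PORT A =====
-- loop body of A: try/except str.index = find (-1 when absent); dedup via new_url_list.count(x) == 1
def solutionStep (new_url_list : List String) (url : String) : List String :=
  let index_plus := PySem.Str.find url "+"
  let index_dog := PySem.Str.find url "@"
  if index_plus = -1 then
    (if PySem.List.count new_url_list url = 1 then new_url_list else new_url_list ++ [url])
  else if index_plus > index_dog then
    (if PySem.List.count new_url_list url = 1 then new_url_list else new_url_list ++ [url])
  else
    let new_url : String :=
      String.ofList (PySem.Chars.slice url.toList (some 0) (some index_plus) ++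
        PySem.Chars.slice url.toList (some index_dog) none)
    if PySem.List.count new_url_list new_url = 1 then new_url_list else new_url_list ++ [new_url]

def solution (list_urls : List String) : Int :=
  ((list_urls.foldl solutionStep []).length : Int)

-- ===== PORT B =====
def transform_alt (url : String) : String :=
  let p := PySem.Str.find url "+"
  let a := PySem.Str.find url "@"
  if p = -1 ∨ p > a then url
  else String.ofList (PySem.Chars.slice url.toList (some 0) (some p) ++
        PySem.Chars.slice url.toList (some a) none)

-- loop body of B's distinct-count sweep: state = (count, prev)
def countStep (st : Int × Option String) (t : String) : Int × Option String :=
  if st.2 ≠ some t then (st.1 + 1, some t) else st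

def solution_alt (list_urls : List String) : Int :=
  ((PySem.List.sorted (list_urls.map transform_alt) (fun x => x) false).foldl countStep (0, none)).1

-- ===== PRECONDITION & SPEC =====
def Spec_solution (list_urls : List String) (out : Int) : Prop := out = solution_alt list_urls
instance (list_urls : List String) (out : Int) : Decidable (Spec_solution list_urls out) := by unfold Spec_solution; infer_instance

-- ===== CLAIM (what is proved, stated in full; the proofs are below) =====
def Claim_equal_solution : Prop := ∀ (list_urls : List String), Dom_solution list_urls → Spec_solution list_urls (solution list_urls)

-- ===== LEMMAS AND PROOFS =====

-- A's count-based conditional append is set-insertion on a duplicate-free accumulator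
lemma add_eq (acc : List String) (v : String) (h : acc.Nodup) :
    (if PySem.List.count acc v = 1 then acc else acc ++ [v]) = PySem.Set.add acc v := by
  by_cases hv : v ∈ acc
  · simp [PySem.Set.add, PySem.List.count_eq, List.count_eq_one_of_mem h hv, hv]
  · simp [PySem.Set.add, PySem.List.count_eq, List.count_eq_zero_of_not_mem hv, hv]

lemma step_eq (acc : List String) (url : String) (h : acc.Nodup) :
    solutionStep acc url = PySem.Set.add acc (transform_alt url) := by
  unfold solutionStep transform_alt
  by_cases h1 : PySem.Str.find url "+" = -1 <;>
    by_cases h2 : PySem.Str.find url "+" > PySem.Str.find url "@" <;>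
      simp only [h1, h2, or_true, true_or, or_self, if_pos, if_neg, not_false_iff] <;>
      first
        | exact add_eq acc url h
        | exact add_eq acc _ h

lemma nodup_add (acc : List String) (x : String) (h : acc.Nodup) :
    (PySem.Set.add acc x).Nodup := by
  by_cases hx : x ∈ acc
  · simpa [PySem.Set.add, hx] using h
  · simp [PySem.Set.add, hx, List.nodup_append, h]
    exact fun a ha hax => hx (hax ▸ ha)

lemma fold_inv : ∀ (l : List String) (acc : List String), acc.Nodup →
    l.foldl solutionStep acc = l.foldl (fun a u => PySem.Set.add a (transform_alt u)) acc := by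
  intro l
  induction l with
  | nil => intro acc _; rfl
  | cons u r ih =>
      intro acc h
      simp only [List.foldl_cons, step_eq acc u h]
      exact ih _ (nodup_add acc (transform_alt u) h)

lemma card_insert_aux (A : Finset String) (t : String) :
    (((insert t A).card : Int)) = 1 + ((A.erase t).card : Int) := by
  by_cases h : t ∈ A
  · rw [Finset.insert_eq_self.mpr h]
    have h1 : (A.erase t).card = A.card - 1 := Finset.card_erase_of_mem h
    have h2 : 1 ≤ A.card := Finset.card_pos.mpr ⟨t, h⟩
    omega
  · rw [Finset.card_insert_of_notMem h, Finset.erase_eq_of_notMem h]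
    push_cast; ring

lemma countAux : ∀ (s : List String), s.Pairwise (· ≤ ·) → ∀ (c : Int) (x : String),
    (∀ y ∈ s, x ≤ y) →
    (s.foldl countStep (c, some x)).1 = c + ((s.toFinset.erase x).card : Int) := by
  intro s
  induction s with
  | nil => intro _ c x _; simp
  | cons t r ih =>
      intro hp c x hx
      have ht : ∀ y ∈ r, t ≤ y := (List.pairwise_cons.mp hp).1
      have hr : r.Pairwise (· ≤ ·) := (List.pairwise_cons.mp hp).2
      by_cases htx : t = x
      · subst htx
        have hstep : countStep (c, some t) t = (c, some t) := by simp [countStep]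
        rw [List.foldl_cons, hstep, ih hr c t (fun y hy => ht y hy)]
        simp [Finset.erase_insert_eq_erase]
      · have hstep : countStep (c, some x) t = (c + 1, some t) := by
          simp [countStep]; exact fun h => htx h.symm
        rw [List.foldl_cons, hstep, ih hr (c + 1) t ht]
        have hxt : x ∉ insert t r.toFinset := by
          simp only [Finset.mem_insert, List.mem_toFinset]
          rintro (rfl | hxr)
          · exact htx rfl
          · exact htx (le_antisymm (ht x hxr) (hx t (List.mem_cons_self)))
        rw [List.toFinset_cons, Finset.erase_eq_of_notMem hxt, card_insert_aux]
        ring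

lemma countFold : ∀ (s : List String), s.Pairwise (· ≤ ·) →
    (s.foldl countStep (0, none)).1 = (s.toFinset.card : Int) := by
  intro s hs
  cases s with
  | nil => simp
  | cons t r =>
      have ht : ∀ y ∈ r, t ≤ y := (List.pairwise_cons.mp hs).1
      have hr : r.Pairwise (· ≤ ·) := (List.pairwise_cons.mp hs).2
      have hstep : countStep ((0 : Int), (none : Option String)) t = (1, some t) := by
        simp [countStep]
      rw [List.foldl_cons, hstep, countAux r hr 1 t ht, List.toFinset_cons, card_insert_aux]

-- ===== VERDICT (by name: the statement is the Claim_ definition above) =====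
theorem solution_spec : Claim_equal_solution := by
  intro l _
  unfold Spec_solution solution solution_alt
  set m := l.map transform_alt with hm
  -- A side: the accumulator is exactly set(map transform l) in first-occurrence order
  have hA : l.foldl solutionStep [] = PySem.Set.ofList m := by
    rw [fold_inv l [] List.nodup_nil, PySem.Set.ofList_eq_foldl, hm, List.foldl_map]
  have hAset : (PySem.Set.ofList m).toFinset = m.toFinset := by
    ext y; simp [List.mem_toFinset, PySem.Set.mem_ofList]
  have hAlen : ((l.foldl solutionStep []).length : Int) = (m.toFinset.card : Int) := by
    rw [hA, ← List.toFinset_card_of_nodup (PySem.Set.nodup_ofList m), hAset]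
  -- B side: the sorted sweep counts the same distinct set
  have hps : (PySem.List.sorted m (fun x => x) false).Pairwise (· ≤ ·) := by
    simpa using PySem.List.sorted_pairwise m (fun x => x)
  have hB : ((PySem.List.sorted m (fun x => x) false).foldl countStep (0, none)).1
      = (m.toFinset.card : Int) := by
    rw [countFold _ hps]
    have hset : (PySem.List.sorted m (fun x => x) false).toFinset = m.toFinset := by
      ext y; simp [List.mem_toFinset, PySem.List.mem_sorted]
    rw [hset]
  rw [hAlen, hB]
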